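-- pv_equiv track=rewrite | github.com/polsebas/agno-dev-toolkit | rag/ingestion/chunker.py | chunk_code
-- ===== SOURCE A (Python) =====
-- def chunk_code(snippet: str, context: dict = None, max_lines=60):
--     context = context or {}
--     class_name = context.get("class_name")
--     setup_code = context.get("setup_code")
--     signature = context.get("signature", "")
--
--     prefix_parts = []
--     if class_name:
--         prefix_parts.append(f"class {class_name}:")
--     if setup_code:
--         if class_name:
--             indented_setup = "\n".join(f"    {line}" for line in setup_code.split("\n") if line)
--             prefix_parts.append(indented_setup)
--         else:
--             prefix_parts.append(setup_code)
--
--     # Always ensure two newlines after prefix if it exists to separate it clearly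
--     prefix_str = "\n".join(prefix_parts) + "\n\n" if prefix_parts else ""
--
--     indent_prefix = "    " if class_name else ""
--
--     lines = snippet.split("\n")
--
--     if len(lines) <= max_lines:
--         indented_snippet = "\n".join(f"{indent_prefix}{line}" if line else "" for line in lines)
--         return [prefix_str + indented_snippet]
--
--     chunks = []
--     current_block = []
--
--     for line in lines:
--         current_block.append(line)
--         if len(current_block) >= max_lines:
--             split_idx = -1
--             for i in range(len(current_block)-1, 0, -1):
--                 if current_block[i].strip() == "":
--                     split_idx = i
--                     break
--
--             if split_idx != -1:
--                 chunk_lines = current_block[:split_idx]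
--                 current_block = current_block[split_idx+1:]
--             else:
--                 chunk_lines = current_block
--                 current_block = []
--
--             chunks.append(chunk_lines)
--
--     if current_block:
--         chunks.append(current_block)
--
--     final_chunks = []
--     for i, c_lines in enumerate(chunks):
--         indented_lines = "\n".join(f"{indent_prefix}{l}" if l else "" for l in c_lines)
--
--         if i == 0:
--             final_text = prefix_str + indented_lines
--         else:
--             indented_sig = "\n".join(f"{indent_prefix}{l}" if l else "" for l in signature.split("\n"))
--             final_text = prefix_str + indented_sig + "\n" + indented_lines
--
--         if final_text.strip():
--             final_chunks.append(final_text)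
--
--     return final_chunks
-- ===== SOURCE B (Python) =====
-- def chunk_code(snippet: str, context: dict = None, max_lines=60):
--     ctx = context or {}
--     class_name = ctx.get("class_name")
--     setup_code = ctx.get("setup_code")
--     signature = ctx.get("signature", "")
--
--     prefix_parts = []
--     if class_name:
--         prefix_parts.append(f"class {class_name}:")
--     if setup_code:
--         if class_name:
--             prefix_parts.append("\n".join(f"    {l}" for l in setup_code.split("\n") if l))
--         else:
--             prefix_parts.append(setup_code)
--     prefix_str = "\n".join(prefix_parts) + "\n\n" if prefix_parts else ""
--     indent = "    " if class_name else ""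
--
--     def reindent(ls):
--         return "\n".join(f"{indent}{l}" if l else "" for l in ls)
--
--     lines = snippet.split("\n")
--     if len(lines) <= max_lines:
--         return [prefix_str + reindent(lines)]
--
--     # index-free scan over the remaining suffix: cut each full window at its
--     # last blank line (never at offset 0), dropping the blank; else cut at the
--     # window boundary.
--     step = max_lines if max_lines > 1 else 1
--     blocks = []
--     rest = lines
--     while len(rest) >= step:
--         window = rest[:step]
--         j = step - 1
--         while j > 0 and window[j].strip() != "":
--             j -= 1
--         if j == 0:
--             blocks.append(window)
--             rest = rest[step:]
--         else:
--             blocks.append(window[:j])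
--             rest = rest[j + 1:]
--     if rest:
--         blocks.append(rest)
--
--     sig_block = reindent(signature.split("\n")) + "\n"
--     texts = [prefix_str + (sig_block if i else "") + reindent(b) for i, b in enumerate(blocks)]
--     return [t for t in texts if t.strip()]
-- ===== Notes on version B (the rewrite author's own statement) =====
-- stated objective: alternative
-- what changed: Replaces A's accumulate-into-current_block-and-flush-on-threshold loop (plus trailing-block append) with a single scan over the remaining suffix that takes each max_lines-sized window and cuts it at its last interior blank line; the formatting pass is the same.
import Mathlib
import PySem

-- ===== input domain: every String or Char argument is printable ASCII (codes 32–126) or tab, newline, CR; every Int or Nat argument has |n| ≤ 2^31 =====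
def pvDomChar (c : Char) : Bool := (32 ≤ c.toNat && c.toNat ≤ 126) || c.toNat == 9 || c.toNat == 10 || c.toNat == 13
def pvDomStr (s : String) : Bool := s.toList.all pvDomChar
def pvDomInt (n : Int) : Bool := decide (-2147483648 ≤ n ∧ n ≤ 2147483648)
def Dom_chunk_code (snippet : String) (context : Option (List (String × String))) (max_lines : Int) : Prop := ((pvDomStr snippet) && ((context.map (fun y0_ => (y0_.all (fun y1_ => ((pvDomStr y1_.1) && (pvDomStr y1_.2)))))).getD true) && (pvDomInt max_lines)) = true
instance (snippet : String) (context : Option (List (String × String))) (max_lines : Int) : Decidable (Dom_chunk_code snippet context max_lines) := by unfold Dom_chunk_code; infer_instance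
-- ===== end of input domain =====

-- B replaces A's accumulate-into-current_block-and-flush loop by a scan over the remaining
-- suffix that cuts each full window at its last interior blank line; same prefix/signature
-- formatting, same return value (alternative decomposition, no speed claim).

def pvSplitNL (s : String) : List String := (PySem.Str.split? s "\n").getD []

-- helpers shared by both ports (these Python lines are identical in Source A and Source B):
-- `"\n".join(f"{indent}{l}" if l else "" for l in ls)`
def pvReindent (ind : String) (ls : List String) : String :=
  PySem.Str.join "\n" (ls.map (fun l => if l ≠ "" then ind ++ l else ""))

def pvTruthy (o : Option String) : Bool :=
  match o with
  | some s => s ≠ ""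
  | none => false

-- the common front matter: (prefix_str, indent_prefix, signature)
def pvSetup (context : Option (List (String × String))) : String × String × String :=
  let ctx : PySem.Dict String String := PySem.Dict.ofList (context.getD [])
  let cn := ctx.get? "class_name"
  let sc := ctx.get? "setup_code"
  let signature := (ctx.get? "signature").getD ""
  let p1 : List String := if pvTruthy cn then ["class " ++ cn.getD "" ++ ":"] else []
  let p2 : List String :=
    if pvTruthy sc then
      if pvTruthy cn then
        [PySem.Str.join "\n"
          (((pvSplitNL (sc.getD "")).filter (fun l => l ≠ "")).map (fun l => "    " ++ l))]
      else [sc.getD ""]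
    else []
  let parts := p1 ++ p2
  let prefix_str := if parts ≠ [] then PySem.Str.join "\n" parts ++ "\n\n" else ""
  let indent := if pvTruthy cn then "    " else ""
  (prefix_str, indent, signature)

-- ===== PORT A =====
-- `for i in range(len(b)-1, 0, -1): if b[i].strip() == "": split_idx = i; break` (else -1)
def pvFindSplitLoop (b : List String) : Nat → Int
  | 0 => -1
  | i + 1 =>
    if PySem.Str.strip ((PySem.List.pyGet? b ((i + 1 : Nat) : Int)).getD "") = "" then ((i + 1 : Nat) : Int)
    else pvFindSplitLoop b i

def pvFindSplitA (b : List String) : Int := pvFindSplitLoop b (b.length - 1)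

-- A's main loop: state (chunks so far, current_block); returns (chunks, final current_block)
def pvLoopA (m : Int) : List String → List String → List (List String) × List String
  | block, [] => ([], block)
  | block, l :: ls =>
    let b := block ++ [l]
    if (b.length : Int) ≥ m then
      let si := pvFindSplitA b
      if si ≠ -1 then
        let r := pvLoopA m (PySem.List.slice b (some (si + 1)) none) ls
        (PySem.List.slice b none (some si) :: r.1, r.2)
      else
        let r := pvLoopA m [] ls
        (b :: r.1, r.2)
    else pvLoopA m b ls

def chunk_code (snippet : String) (context : Option (List (String × String))) (max_lines : Int) : List String :=
  let s := pvSetup context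
  let prefix_str := s.1
  let indent_prefix := s.2.1
  let signature := s.2.2
  let lines := pvSplitNL snippet
  if (lines.length : Int) ≤ max_lines then
    [prefix_str ++ pvReindent indent_prefix lines]
  else
    let r := pvLoopA max_lines [] lines
    let chunks := r.1 ++ (if r.2 ≠ [] then [r.2] else [])
    ((PySem.List.enumerate chunks).map (fun ic =>
        let indented := pvReindent indent_prefix ic.2
        if ic.1 = 0 then prefix_str ++ indented
        else prefix_str ++ pvReindent indent_prefix (pvSplitNL signature) ++ "\n" ++ indented)).filter
      (fun txt => PySem.Str.strip txt ≠ "")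

-- ===== PORT B =====
-- `j = step-1; while j > 0 and window[j].strip() != "": j -= 1`  (0 = no interior blank)
def pvLastBlankB (w : List String) : Nat → Nat
  | 0 => 0
  | j + 1 =>
    if PySem.Str.strip ((PySem.List.pyGet? w ((j + 1 : Nat) : Int)).getD "") ≠ "" then pvLastBlankB w j
    else j + 1

-- B's scan over the remaining suffix, emitting the blocks
def pvScanB (t : Nat) (rest : List String) : List (List String) :=
  if h : 1 ≤ t ∧ t ≤ rest.length then
    let w := rest.take t
    let j := pvLastBlankB w (t - 1)
    if j = 0 then w :: pvScanB t (rest.drop t)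
    else w.take j :: pvScanB t (rest.drop (j + 1))
  else if rest ≠ [] then [rest] else []
termination_by rest.length
decreasing_by
  · simp only [List.length_drop]; omega
  · simp only [List.length_drop]; omega

def chunk_code_alt (snippet : String) (context : Option (List (String × String))) (max_lines : Int) : List String :=
  let s := pvSetup context
  let prefix_str := s.1
  let indent := s.2.1
  let signature := s.2.2
  let lines := pvSplitNL snippet
  if (lines.length : Int) ≤ max_lines then
    [prefix_str ++ pvReindent indent lines]
  else
    let t : Nat := if max_lines > 1 then max_lines.toNat else 1
    let blocks := pvScanB t lines
    let sig_block := pvReindent indent (pvSplitNL signature) ++ "\n"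
    let texts := (PySem.List.enumerate blocks).map
      (fun ib => prefix_str ++ (if ib.1 ≠ 0 then sig_block else "") ++ pvReindent indent ib.2)
    texts.filter (fun txt => PySem.Str.strip txt ≠ "")

-- ===== PRECONDITION & SPEC =====
def Spec_chunk_code (snippet : String) (context : Option (List (String × String))) (max_lines : Int) (out : List String) : Prop := out = chunk_code_alt snippet context max_lines
instance (snippet : String) (context : Option (List (String × String))) (max_lines : Int) (out : List String) : Decidable (Spec_chunk_code snippet context max_lines out) := by unfold Spec_chunk_code; infer_instance

-- ===== CLAIM (what is proved, stated in full; the proofs are below) =====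
def Claim_equal_chunk_code : Prop := ∀ (snippet : String) (context : Option (List (String × String))) (max_lines : Int), Dom_chunk_code snippet context max_lines → Spec_chunk_code snippet context max_lines (chunk_code snippet context max_lines)

-- ===== LEMMAS AND PROOFS =====

theorem pvLastBlankB_le (w : List String) (j : Nat) : pvLastBlankB w j ≤ j := by
  induction j with
  | zero => simp [pvLastBlankB]
  | succ j ih =>
    rw [pvLastBlankB]
    split
    · omega
    · omega

theorem pvFindSplit_eq (b : List String) (j : Nat) :
    pvFindSplitLoop b j = if pvLastBlankB b j = 0 then -1 else ((pvLastBlankB b j : Nat) : Int) := by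
  induction j with
  | zero => simp [pvFindSplitLoop, pvLastBlankB]
  | succ j ih =>
    rw [pvFindSplitLoop, pvLastBlankB]
    push_cast
    by_cases h : PySem.Str.strip ((PySem.List.pyGet? b ((j : Int) + 1)).getD "") = ""
    · simp [h]
    · simp [h, ih]

theorem pvThreshold (m : Int) (n : Nat) (hn : 1 ≤ n) :
    ((n : Int) ≥ m) ↔ (if m > 1 then m.toNat else 1) ≤ n := by
  split <;> omega

-- core: A's flush loop produces exactly B's scan blocks
theorem pvLoop_eq_scan (m : Int) (t : Nat) (ht : t = if m > 1 then m.toNat else 1)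
    (ls : List String) : ∀ block : List String, block.length < t →
    (pvLoopA m block ls).1 ++ (if (pvLoopA m block ls).2 ≠ [] then [(pvLoopA m block ls).2] else []) =
      pvScanB t (block ++ ls) := by
  have ht1 : 1 ≤ t := by rw [ht]; split <;> omega
  induction ls with
  | nil =>
    intro block hb
    rw [pvLoopA, pvScanB]
    rw [dif_neg (by simp; omega)]
    simp
  | cons l ls ih =>
    intro block hb
    rw [pvLoopA]
    simp only
    set b := block ++ [l] with hbdef
    have hblen : b.length = block.length + 1 := by simp [hbdef]
    have hcond : ((b.length : Int) ≥ m) ↔ t ≤ b.length := by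
      rw [ht]; exact pvThreshold m b.length (by omega)
    have hassoc : block ++ l :: ls = b ++ ls := by simp [hbdef]
    by_cases hflush : (b.length : Int) ≥ m
    · have hbt : b.length = t := by omega
      have hjle : pvLastBlankB b (t - 1) ≤ t - 1 := pvLastBlankB_le b (t - 1)
      rw [if_pos hflush]
      have hrhs : pvScanB t (block ++ l :: ls) =
          if pvLastBlankB b (t - 1) = 0 then b :: pvScanB t ls
          else b.take (pvLastBlankB b (t - 1)) ::
            pvScanB t (b.drop (pvLastBlankB b (t - 1) + 1) ++ ls) := by
        rw [hassoc, pvScanB, dif_pos ⟨ht1, by rw [List.length_append]; omega⟩]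
        simp only
        rw [show (b ++ ls).take t = b from by rw [← hbt]; exact List.take_left]
        rw [show (b ++ ls).drop t = ls from by rw [← hbt]; exact List.drop_left]
        rw [List.drop_append_of_le_length (by omega)]
      by_cases hz : pvLastBlankB b (t - 1) = 0
      · have hA : pvFindSplitA b = -1 := by
          rw [pvFindSplitA, hbt, pvFindSplit_eq, if_pos hz]
        rw [hrhs, if_pos hz, hA]
        simp only [ne_eq, not_true_eq_false, if_false]
        rw [List.cons_append, ih [] (by simp; omega)]
        simp
      · have hA : pvFindSplitA b = ((pvLastBlankB b (t - 1) : Nat) : Int) := by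
          rw [pvFindSplitA, hbt, pvFindSplit_eq, if_neg hz]
        rw [hrhs, if_neg hz, hA]
        rw [if_pos (show ((pvLastBlankB b (t - 1) : Nat) : Int) ≠ -1 by omega)]
        simp only
        have hslice1 : PySem.List.slice b none (some ((pvLastBlankB b (t - 1) : Nat) : Int)) =
            b.take (pvLastBlankB b (t - 1)) := PySem.List.slice_to_natCast b _
        have hslice2 : PySem.List.slice b (some (((pvLastBlankB b (t - 1) : Nat) : Int) + 1)) none =
            b.drop (pvLastBlankB b (t - 1) + 1) := by
          rw [show ((pvLastBlankB b (t - 1) : Nat) : Int) + 1 = ((pvLastBlankB b (t - 1) + 1 : Nat) : Int) from by push_cast; ring]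
          exact PySem.List.slice_from_natCast b _
        rw [hslice1, hslice2, List.cons_append]
        rw [ih (b.drop (pvLastBlankB b (t - 1) + 1)) (by simp only [List.length_drop]; omega)]
    · rw [if_neg hflush, hassoc]
      exact ih b (by omega)

-- the two formatting passes agree chunk by chunk (only the string grouping differs)
theorem pvFormat_eq (pfx ind sig : String) (ic : Int × List String) :
    (if ic.1 = 0 then pfx ++ pvReindent ind ic.2
     else pfx ++ pvReindent ind (pvSplitNL sig) ++ "\n" ++ pvReindent ind ic.2) =
      pfx ++ (if ic.1 ≠ 0 then pvReindent ind (pvSplitNL sig) ++ "\n" else "") ++ pvReindent ind ic.2 := by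
  by_cases h : ic.1 = 0
  · simp [h, String.append_empty]
  · simp only [h, ne_eq, not_false_eq_true, if_true]
    simp [String.append_assoc]

theorem chunk_code_spec : Claim_equal_chunk_code := by
  intro snippet context max_lines _
  unfold Spec_chunk_code chunk_code chunk_code_alt
  simp only
  by_cases hfast : (((pvSplitNL snippet).length : Int)) ≤ max_lines
  · rw [if_pos hfast, if_pos hfast]
  · rw [if_neg hfast, if_neg hfast]
    have hblocks := pvLoop_eq_scan max_lines (if max_lines > 1 then max_lines.toNat else 1) rfl
      (pvSplitNL snippet) [] (by simp only [List.length_nil]; split <;> omega)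
    rw [List.nil_append] at hblocks
    rw [← hblocks]
    congr 1
    apply List.map_congr_left
    intro ic _
    exact pvFormat_eq _ _ _ ic
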